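-- pv_equiv track=rewrite | github.com/ppgsalomao/adventofcode | 2025/day7/problem1.py | split_bean
-- ===== SOURCE A (Python) =====
-- def add_beam_to_position(tachyon_manifold, layer_number, column_number):
--     if layer_number >= len(tachyon_manifold):
--         return
--     tachyon_manifold[layer_number] = tachyon_manifold[layer_number][:column_number] + '|' + tachyon_manifold[layer_number][column_number+1:]
--
-- def split_bean(tachyon_manifold, layer_number):
--     if layer_number >= len(tachyon_manifold):
--         return 0
--
--     beam_split_count = 0
--     for column in range(len(tachyon_manifold[layer_number])):
--         has_beam_above = layer_number > 0 and (tachyon_manifold[layer_number - 1][column] == '|')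
--         is_beam_splitter = tachyon_manifold[layer_number][column] == '^'
--         is_previous_space_empty = column - 1 >= 0 and tachyon_manifold[layer_number][column - 1] == '.'
--         is_next_space_empty = column + 1 < len(tachyon_manifold[layer_number]) and tachyon_manifold[layer_number][column + 1] == '.'
--
--         if has_beam_above and is_beam_splitter:
--             if is_previous_space_empty:
--                 add_beam_to_position(tachyon_manifold, layer_number, column - 1)
--             if is_next_space_empty:
--                 add_beam_to_position(tachyon_manifold, layer_number, column + 1)
--             beam_split_count += 1
--
--     tachyon_manifold[layer_number] = tachyon_manifold[layer_number].replace('/', '|')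
--
--     return beam_split_count
-- ===== SOURCE B (Python) =====
-- def split_bean(tachyon_manifold, layer_number):
--     if layer_number >= len(tachyon_manifold):
--         return 0
--     row = tachyon_manifold[layer_number]
--     if layer_number > 0:
--         prev = tachyon_manifold[layer_number - 1]
--         firing = {c for c in range(len(row)) if row[c] == '^' and prev[c] == '|'}
--     else:
--         firing = set()
--     tachyon_manifold[layer_number] = ''.join(
--         '|' if ch == '/' or (ch == '.' and (c - 1 in firing or c + 1 in firing)) else ch
--         for c, ch in enumerate(row))
--     return len(firing)
-- ===== Notes on version B (the rewrite author's own statement) =====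
-- stated objective: alternative
-- what changed: B replaces A's in-place slice-splicing loop (which rewrites the row string while still iterating over it) with a two-phase index-first structure: one pass collects the set of firing splitter columns via short-circuit on '^', then the new row is rebuilt cell-by-cell from the original row and the count is just len(firing).
import Mathlib
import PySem

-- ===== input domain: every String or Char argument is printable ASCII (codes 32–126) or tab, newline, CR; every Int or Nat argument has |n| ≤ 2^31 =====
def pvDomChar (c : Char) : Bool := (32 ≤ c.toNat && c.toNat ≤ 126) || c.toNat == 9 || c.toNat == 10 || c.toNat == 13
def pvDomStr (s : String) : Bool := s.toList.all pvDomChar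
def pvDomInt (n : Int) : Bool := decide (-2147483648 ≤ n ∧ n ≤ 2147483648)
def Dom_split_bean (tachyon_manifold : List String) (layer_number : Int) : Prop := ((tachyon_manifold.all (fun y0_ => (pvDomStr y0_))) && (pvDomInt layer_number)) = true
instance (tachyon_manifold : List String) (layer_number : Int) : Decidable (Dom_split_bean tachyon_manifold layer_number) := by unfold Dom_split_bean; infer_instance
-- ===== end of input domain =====

-- B replaces A's in-place slice rebuilding with an index-first pass (collect firing splitter columns,
-- then rebuild the row from the original); equivalence proved here is about the RETURN value — both
-- Pythons additionally mutate tachyon_manifold[layer_number] identically, a side effect not modeled.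

-- ===== PORT A =====
-- add_beam_to_position: its 'layer_number >= len' guard is false at every call site inside split_bean,
-- so the state kept here is just the mutated row string (as List Char).
def pvAddBeam (row : List Char) (col : Int) : List Char :=
  PySem.List.slice row none (some col) ++ ['|'] ++ PySem.List.slice row (some (col + 1)) none

-- one iteration of A's for-loop: state = (current row, beam_split_count)
def pvStepA (ln : Int) (prev : List Char) (st : List Char × Int) (column : Nat) : List Char × Int :=
  let row := st.1
  let hasBeamAbove := decide (0 < ln) && (PySem.List.pyGetD prev (column : Int) ' ' == '|')
  let isBeamSplitter := PySem.List.pyGetD row (column : Int) ' ' == '^'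
  let isPrevEmpty := decide (0 ≤ (column : Int) - 1) && (PySem.List.pyGetD row ((column : Int) - 1) ' ' == '.')
  let isNextEmpty := decide ((column : Int) + 1 < (row.length : Int)) && (PySem.List.pyGetD row ((column : Int) + 1) ' ' == '.')
  if hasBeamAbove && isBeamSplitter then
    let row1 := if isPrevEmpty then pvAddBeam row ((column : Int) - 1) else row
    let row2 := if isNextEmpty then pvAddBeam row1 ((column : Int) + 1) else row1
    (row2, st.2 + 1)
  else (row, st.2)

def split_bean (tachyon_manifold : List String) (layer_number : Int) : Int :=
  if layer_number ≥ (tachyon_manifold.length : Int) then 0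
  else
    let row0 := ((PySem.List.pyGet? tachyon_manifold layer_number).map String.toList).getD []
    let prev := ((PySem.List.pyGet? tachyon_manifold (layer_number - 1)).map String.toList).getD []
    ((List.range row0.length).foldl (pvStepA layer_number prev) (row0, 0)).2
    -- the final replace('/', '|') only mutates the row; it does not touch the returned count

-- ===== PORT B =====
-- firing = {c for c in range(len(row)) if row[c] == '^' and prev[c] == '|'}
def pvFiring (prev row : List Char) : List Nat :=
  (List.range row.length).filter (fun c =>
    (PySem.List.pyGetD row (c : Int) ' ' == '^') && (PySem.List.pyGetD prev (c : Int) ' ' == '|'))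

def split_bean_alt (tachyon_manifold : List String) (layer_number : Int) : Int :=
  if layer_number ≥ (tachyon_manifold.length : Int) then 0
  else
    let row := ((PySem.List.pyGet? tachyon_manifold layer_number).map String.toList).getD []
    let firing :=
      if 0 < layer_number then
        pvFiring (((PySem.List.pyGet? tachyon_manifold (layer_number - 1)).map String.toList).getD []) row
      else []
    -- B's rebuilt row is a pure mutation of tachyon_manifold[layer_number]; the return value is len(firing)
    (firing.length : Int)

-- ===== PRECONDITION & SPEC =====
-- Pre_ excludes exactly the inputs where A raises IndexError: layer_number < -len(tachyon_manifold)
-- (the row fetch raises), or a previous row shorter than the current row (prev[column] raises).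
def Pre_split_bean (tachyon_manifold : List String) (layer_number : Int) : Prop :=
  -(tachyon_manifold.length : Int) ≤ layer_number ∧
  (0 < layer_number → layer_number < (tachyon_manifold.length : Int) →
    (tachyon_manifold.getD layer_number.toNat "").toList.length ≤
      (tachyon_manifold.getD (layer_number.toNat - 1) "").toList.length)
instance (tachyon_manifold : List String) (layer_number : Int) : Decidable (Pre_split_bean tachyon_manifold layer_number) := by unfold Pre_split_bean; infer_instance

def pvWitness_split_bean : List String × Int := (["..|..", ".^^.."], 1)

def Spec_split_bean (tachyon_manifold : List String) (layer_number : Int) (out : Int) : Prop := out = split_bean_alt tachyon_manifold layer_number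
instance (tachyon_manifold : List String) (layer_number : Int) (out : Int) : Decidable (Spec_split_bean tachyon_manifold layer_number out) := by unfold Spec_split_bean; infer_instance

-- ===== CLAIM (what is proved, stated in full; the proofs are below) =====
def Claim_equal_split_bean : Prop := ∀ (tachyon_manifold : List String) (layer_number : Int), Dom_split_bean tachyon_manifold layer_number → Pre_split_bean tachyon_manifold layer_number → Spec_split_bean tachyon_manifold layer_number (split_bean tachyon_manifold layer_number)

-- ===== LEMMAS AND PROOFS =====

-- the condition under which A counts column c, phrased on the ORIGINAL row
def pvCondA (ln : Int) (prev row0 : List Char) (c : Nat) : Bool :=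
  decide (0 < ln) && (PySem.List.pyGetD prev (c : Int) ' ' == '|') && (row0.getD c ' ' == '^')

lemma pvAddBeam_eq_set (row : List Char) (j : Nat) (hj : j < row.length) :
    pvAddBeam row (j : Int) = row.set j '|' := by
  have h1 : PySem.List.slice row none (some (j : Int)) = row.take j :=
    PySem.List.slice_to_natCast row j
  have h2 : PySem.List.slice row (some ((j : Int) + 1)) none = row.drop (j + 1) := by
    have := PySem.List.slice_from_natCast row (j + 1)
    simpa using this
  rw [List.set_eq_take_append_cons_drop, if_pos hj]
  simp [pvAddBeam, h1, h2]

-- if a cell that currently holds '.' is overwritten with '|', the length and the '^'-profile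
-- (relative to the original row) are unchanged
lemma set_keeps_inv (row row0 : List Char) (j : Nat) (hj : j < row.length)
    (hdot : row.getD j ' ' = '.')
    (hlen : row.length = row0.length)
    (hiff : ∀ i, row.getD i ' ' = '^' ↔ row0.getD i ' ' = '^') :
    (row.set j '|').length = row0.length ∧
    (∀ i, (row.set j '|').getD i ' ' = '^' ↔ row0.getD i ' ' = '^') := by
  refine ⟨by simpa using hlen, fun i => ?_⟩
  rcases eq_or_ne i j with rfl | hne
  · have h1 : (row.set i '|').getD i ' ' = '|' := by
      simp [List.getD, hj]
    rw [h1, ← hiff i, hdot]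
    simp
  · have h1 : (row.set j '|').getD i ' ' = row.getD i ' ' := by
      simp [List.getD, Ne.symm hne]
    rw [h1, hiff i]

-- a cell that holds '.' and is written is in range (getD would return the default ' ' otherwise)
lemma dot_in_range (row : List Char) (j : Nat) (hdot : row.getD j ' ' = '.') : j < row.length := by
  by_contra hge
  rw [List.getD_eq_default _ _ (by omega)] at hdot
  exact absurd hdot (by decide)

-- the main loop invariant: A's in-place writes never change where the '^'s are (they only turn
-- '.' cells into '|'), so the returned count only depends on the original row
lemma pvLoop (ln : Int) (prev row0 : List Char) :
    ∀ (L : List Nat) (row : List Char) (cnt : Int),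
    row.length = row0.length →
    (∀ i, row.getD i ' ' = '^' ↔ row0.getD i ' ' = '^') →
    (L.foldl (pvStepA ln prev) (row, cnt)).2 =
      cnt + ((L.filter (pvCondA ln prev row0)).length : Int) := by
  intro L
  induction L with
  | nil => intro row cnt _ _; simp
  | cons c L ih =>
    intro row cnt hlen hiff
    have hsplit : (PySem.List.pyGetD row (c : Int) ' ' == '^') = (row0.getD c ' ' == '^') := by
      rw [PySem.List.pyGetD_natCast]
      apply Bool.eq_iff_iff.mpr
      simp only [beq_iff_eq]
      exact hiff c
    by_cases hg : (decide (0 < ln) && (PySem.List.pyGetD prev (c : Int) ' ' == '|')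
        && (PySem.List.pyGetD row (c : Int) ' ' == '^')) = true
    · -- guard fires: count goes up, row may get written at c-1 and c+1 (both held '.')
      have hc : pvCondA ln prev row0 c = true := by
        unfold pvCondA; rw [← hsplit]; exact hg
      have hrow2 : ∃ row2 : List Char, List.foldl (pvStepA ln prev) (row, cnt) (c :: L)
            = List.foldl (pvStepA ln prev) (row2, cnt + 1) L ∧
          row2.length = row0.length ∧
          (∀ i, row2.getD i ' ' = '^' ↔ row0.getD i ' ' = '^') := by
          simp only [List.foldl_cons]
          unfold pvStepA
          rw [if_pos (by simpa [Bool.and_assoc] using hg)]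
          set ip := decide (0 ≤ (c : Int) - 1) && (PySem.List.pyGetD row ((c : Int) - 1) ' ' == '.') with hip
          set rown := if ip then pvAddBeam row ((c : Int) - 1) else row with hrown
          have h1 : rown.length = row0.length ∧ ∀ i, rown.getD i ' ' = '^' ↔ row0.getD i ' ' = '^' := by
            rw [hrown]
            split_ifs with hcase
            · rw [hip] at hcase
              simp only [Bool.and_eq_true] at hcase
              obtain ⟨hd, hdot⟩ := hcase
              have hcpos : 1 ≤ c := by have := of_decide_eq_true hd; omega
              have hcast : (c : Int) - 1 = ((c - 1 : Nat) : Int) := by omega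
              rw [hcast, PySem.List.pyGetD_natCast] at hdot
              have hdot' : row.getD (c - 1) ' ' = '.' := by simpa using hdot
              have hjlt : c - 1 < row.length := dot_in_range row (c - 1) hdot'
              rw [hcast, pvAddBeam_eq_set row (c - 1) hjlt]
              exact set_keeps_inv row row0 (c - 1) hjlt hdot' hlen hiff
            · exact ⟨hlen, hiff⟩
          set rown2 := if (decide ((c : Int) + 1 < (row.length : Int)) && (PySem.List.pyGetD row ((c : Int) + 1) ' ' == '.')) then pvAddBeam rown ((c : Int) + 1) else rown with hrown2
          refine ⟨rown2, rfl, ?_⟩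
          rw [hrown2]
          split_ifs with hcase
          · simp only [Bool.and_eq_true] at hcase
            obtain ⟨hd, hdot⟩ := hcase
            have hlt : c + 1 < row.length := by have := of_decide_eq_true hd; omega
            have hcast : (c : Int) + 1 = ((c + 1 : Nat) : Int) := by omega
            rw [hcast, PySem.List.pyGetD_natCast] at hdot
            have hdotrow : row.getD (c + 1) ' ' = '.' := by simpa using hdot
            -- rown agrees with row at c+1: rown is row, possibly written at c-1 ≠ c+1
            have hdotn : rown.getD (c + 1) ' ' = '.' := by
              rw [hrown]
              split_ifs with hcase1
              · rw [hip] at hcase1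
                simp only [Bool.and_eq_true] at hcase1
                obtain ⟨hd1, hdot1⟩ := hcase1
                have hcpos : 1 ≤ c := by have := of_decide_eq_true hd1; omega
                have hcast1 : (c : Int) - 1 = ((c - 1 : Nat) : Int) := by omega
                rw [hcast1, PySem.List.pyGetD_natCast] at hdot1
                have hdot1' : row.getD (c - 1) ' ' = '.' := by simpa using hdot1
                have hj1 : c - 1 < row.length := dot_in_range row (c - 1) hdot1'
                rw [hcast1, pvAddBeam_eq_set row (c - 1) hj1]
                have h2 : (row.set (c - 1) '|').getD (c + 1) ' ' = row.getD (c + 1) ' ' := by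
                  simp [List.getD]
                rw [h2]; exact hdotrow
              · exact hdotrow
            have hlt2 : c + 1 < rown.length := by rw [h1.1, ← hlen]; omega
            rw [hcast, pvAddBeam_eq_set rown (c + 1) hlt2]
            exact set_keeps_inv rown row0 (c + 1) hlt2 hdotn h1.1 h1.2
          · exact h1
      rcases hrow2 with ⟨row2, hfold, hlen2, hiff2⟩
      rw [hfold, ih row2 (cnt + 1) hlen2 hiff2, List.filter_cons_of_pos hc]
      simp only [List.length_cons]
      push_cast
      ring
    · -- guard does not fire: nothing changes at this column
      have hc : pvCondA ln prev row0 c = false := by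
        unfold pvCondA
        rw [← hsplit]
        exact Bool.eq_false_iff.mpr (fun h => hg (by simpa [Bool.and_assoc] using h))
      have hfold : List.foldl (pvStepA ln prev) (row, cnt) (c :: L)
          = List.foldl (pvStepA ln prev) (row, cnt) L := by
        simp only [List.foldl_cons]
        unfold pvStepA
        rw [if_neg (by simpa [Bool.and_assoc] using hg)]
      rw [hfold, ih row cnt hlen hiff, List.filter_cons_of_neg (by simp [hc])]

-- ===== VERDICT (by name: the statement is the Claim_ definition above) =====
theorem split_bean_spec : Claim_equal_split_bean := by
  intro m ln _ _
  unfold Spec_split_bean split_bean split_bean_alt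
  by_cases hlen : ln ≥ (m.length : Int)
  · simp [hlen]
  · simp only [if_neg hlen]
    set row0 := ((PySem.List.pyGet? m ln).map String.toList).getD [] with hrow0
    set prev := ((PySem.List.pyGet? m (ln - 1)).map String.toList).getD [] with hprev
    rw [pvLoop ln prev row0 (List.range row0.length) row0 0 rfl (fun _ => Iff.rfl)]
    by_cases hpos : 0 < ln
    · rw [if_pos hpos]
      unfold pvFiring pvCondA
      rw [zero_add]
      congr 2
      apply List.filter_congr
      intro c _
      simp [hpos, PySem.List.pyGetD_natCast, Bool.and_comm]
    · rw [if_neg hpos]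
      have h0 : List.filter (pvCondA ln prev row0) (List.range row0.length) = [] := by
        apply List.filter_eq_nil_iff.mpr
        intro c _
        unfold pvCondA
        simp [hpos]
      simp [h0]
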